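-- pv_equiv track=rewrite | github.com/randomcuriouscode/Interview-Prep | interview_questions/Amazon/pos_neg_elements.py | pos_neg_pairs
-- ===== SOURCE A (Python) =====
-- def pos_neg_pairs(A):
--     pos = []
--     neg = []
--
--     for i in A:
--         if i >= 0:
--             pos.append(i)
--         else:
--             neg.append(i)
--
--     return [ele for tup in zip(pos,neg) for ele in tup]
-- ===== SOURCE B (Python) =====
-- def pos_neg_pairs(A):
--     # Single streaming pass: queue unmatched elements, emit a (pos, neg) pair
--     # as soon as both queues are non-empty (at most one pair per step).
--     pos_q = []
--     neg_q = []
--     res = []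
--     for x in A:
--         if x >= 0:
--             pos_q.append(x)
--         else:
--             neg_q.append(x)
--         if pos_q and neg_q:
--             res.append(pos_q.pop(0))
--             res.append(neg_q.pop(0))
--     return res
-- ===== Notes on version B (the rewrite author's own statement) =====
-- stated objective: alternative
-- what changed: Fuses A's two phases (partition into pos/neg lists, then zip-and-flatten) into one streaming pass over A that keeps two FIFO queues of unmatched elements and emits a pos/neg pair the moment both queues are non-empty.
import Mathlib
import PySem

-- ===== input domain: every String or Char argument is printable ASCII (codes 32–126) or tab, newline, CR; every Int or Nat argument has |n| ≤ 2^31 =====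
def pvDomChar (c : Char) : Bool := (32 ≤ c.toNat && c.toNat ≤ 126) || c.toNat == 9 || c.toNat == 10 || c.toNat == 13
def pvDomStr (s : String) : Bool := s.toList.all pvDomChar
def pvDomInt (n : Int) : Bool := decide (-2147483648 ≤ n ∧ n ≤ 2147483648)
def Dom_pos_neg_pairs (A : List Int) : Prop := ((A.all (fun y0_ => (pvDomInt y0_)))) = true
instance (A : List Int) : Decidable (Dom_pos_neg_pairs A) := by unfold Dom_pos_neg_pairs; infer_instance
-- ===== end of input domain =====

-- ===== PORT A =====
-- A: two lists built in one pass, then a comprehension over zip(pos, neg).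
def pos_neg_pairs (A : List Int) : List Int :=
  let st := A.foldl
    (fun (s : List Int × List Int) i =>
      if i ≥ 0 then (s.1 ++ [i], s.2) else (s.1, s.2 ++ [i]))
    ([], [])
  (st.1.zip st.2).flatMap (fun tup => [tup.1, tup.2])

-- ===== PORT B =====
-- B: one streaming pass; queue unmatched elements, emit a pair as soon as
-- both queues are non-empty (at most one pair per step, so an if suffices).
def pnpLoop : List Int → List Int → List Int → List Int → List Int
  | [], _, _, res => res
  | x :: rest, pq, nq, res =>
    let pq := if x ≥ 0 then pq ++ [x] else pq
    let nq := if x ≥ 0 then nq else nq ++ [x]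
    match pq, nq with
    | p :: pq', n :: nq' => pnpLoop rest pq' nq' (res ++ [p, n])
    | pq, nq => pnpLoop rest pq nq res

def pos_neg_pairs_alt (A : List Int) : List Int :=
  pnpLoop A [] [] []

-- ===== PRECONDITION & SPEC =====
def Spec_pos_neg_pairs (A : List Int) (out : List Int) : Prop := out = pos_neg_pairs_alt A
instance (A : List Int) (out : List Int) : Decidable (Spec_pos_neg_pairs A out) := by unfold Spec_pos_neg_pairs; infer_instance

-- ===== CLAIM (what is proved, stated in full; the proofs are below) =====
def Claim_equal_pos_neg_pairs : Prop := ∀ (A : List Int), Dom_pos_neg_pairs A → Spec_pos_neg_pairs A (pos_neg_pairs A)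

-- ===== LEMMAS AND PROOFS =====


-- flatten of zip, the shape of A's result
def pnpZF (xs ys : List Int) : List Int :=
  (xs.zip ys).flatMap (fun tup => [tup.1, tup.2])

theorem pnpZF_nil_right (xs : List Int) : pnpZF xs [] = [] := by
  simp [pnpZF]

theorem pnpZF_nil_left (ys : List Int) : pnpZF [] ys = [] := by
  simp [pnpZF]

theorem pnpZF_cons (x n : Int) (xs ys : List Int) :
    pnpZF (x :: xs) (n :: ys) = x :: n :: pnpZF xs ys := by
  simp [pnpZF]

theorem pnp_fold_spec (A : List Int) (p n : List Int) :
    A.foldl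
      (fun (s : List Int × List Int) i =>
        if i ≥ 0 then (s.1 ++ [i], s.2) else (s.1, s.2 ++ [i]))
      (p, n)
    = (p ++ A.filter (fun i => decide (i ≥ 0)),
       n ++ A.filter (fun i => decide (i < 0))) := by
  induction A generalizing p n with
  | nil => simp
  | cons x rest ih =>
    by_cases hx : x ≥ 0
    · have hx' : ¬ x < 0 := by omega
      simp [List.foldl_cons, hx, hx', ih]
    · have hx' : x < 0 := by omega
      simp [List.foldl_cons, hx, hx', ih]

theorem pnpLoop_spec (rest : List Int) (pq nq res : List Int)
    (hinv : pq = [] ∨ nq = []) :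
    pnpLoop rest pq nq res
      = res ++ pnpZF (pq ++ rest.filter (fun i => decide (i ≥ 0)))
                     (nq ++ rest.filter (fun i => decide (i < 0))) := by
  induction rest generalizing pq nq res with
  | nil =>
    rcases hinv with h | h <;> subst h <;>
      simp [pnpLoop, pnpZF_nil_left, pnpZF_nil_right]
  | cons x rest ih =>
    by_cases hx : x ≥ 0
    · have hx' : ¬ x < 0 := by omega
      cases hnq : nq with
      | nil =>
        cases hpq : pq ++ [x] with
        | nil => simp at hpq
        | cons p pq' =>
          rw [show pnpLoop (x :: rest) pq [] res = pnpLoop rest (pq ++ [x]) [] res by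
            simp only [pnpLoop, hx, hpq]; rfl]
          rw [ih (pq ++ [x]) [] res (Or.inr rfl)]
          simp [hx, hx']
      | cons n nq' =>
        have hpq : pq = [] := by
          rcases hinv with h | h
          · exact h
          · rw [h] at hnq; exact absurd hnq (by simp)
        subst hpq
        rw [show pnpLoop (x :: rest) [] (n :: nq') res
              = pnpLoop rest [] nq' (res ++ [x, n]) by
          simp only [pnpLoop, if_pos hx]; rfl]
        rw [ih [] nq' (res ++ [x, n]) (Or.inl rfl)]
        simp [hx, hx', pnpZF_cons]
    · have hx' : x < 0 := by omega
      cases hpq : pq with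
      | nil =>
        cases hnq : nq ++ [x] with
        | nil => simp at hnq
        | cons n nq' =>
          rw [show pnpLoop (x :: rest) [] nq res = pnpLoop rest [] (nq ++ [x]) res by
            simp only [pnpLoop, if_neg hx, hnq]]
          rw [ih [] (nq ++ [x]) res (Or.inl rfl)]
          simp [hx, hx']
      | cons p pq' =>
        have hnq : nq = [] := by
          rcases hinv with h | h
          · rw [h] at hpq; exact absurd hpq (by simp)
          · exact h
        subst hnq
        rw [show pnpLoop (x :: rest) (p :: pq') [] res
              = pnpLoop rest pq' [] (res ++ [p, x]) by
          simp only [pnpLoop, if_neg hx]; rfl]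
        rw [ih pq' [] (res ++ [p, x]) (Or.inr rfl)]
        simp [hx, hx', pnpZF_cons]

-- ===== VERDICT (by name: the statement is the Claim_ definition above) =====
theorem pos_neg_pairs_spec : Claim_equal_pos_neg_pairs := by
  intro A _
  unfold Spec_pos_neg_pairs pos_neg_pairs pos_neg_pairs_alt
  rw [pnp_fold_spec A [] [], pnpLoop_spec A [] [] [] (Or.inl rfl)]
  simp [pnpZF]
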